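-- pv_equiv track=rewrite | github.com/ancasp/proiect_final_anca | pythonProject/python_intermediate/iterators_generators - task.py | div_7_generator
-- ===== SOURCE A (Python) =====
-- def div_7_generator(n):
--     number = 1
--     generated_numbers = 0
--
--     while generated_numbers < n:
--
--         if number % 7 == 0:
--             yield number
--             generated_numbers += 1
--
--         number += 1
-- ===== SOURCE B (Python) =====
-- def div_7_generator(n):
--     yield from (7 * (i + 1) for i in range(n))
-- ===== Notes on version B (the rewrite author's own statement) =====
-- stated objective: faster
-- what changed: B yields the (i+1)-th multiple directly from a range-driven generator expression (yield from (7*(i+1) for i in range(n))) instead of scanning every integer with a while loop and testing % 7, eliminating the divisibility test and the 6-in-7 wasted iterations.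
import Mathlib
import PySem

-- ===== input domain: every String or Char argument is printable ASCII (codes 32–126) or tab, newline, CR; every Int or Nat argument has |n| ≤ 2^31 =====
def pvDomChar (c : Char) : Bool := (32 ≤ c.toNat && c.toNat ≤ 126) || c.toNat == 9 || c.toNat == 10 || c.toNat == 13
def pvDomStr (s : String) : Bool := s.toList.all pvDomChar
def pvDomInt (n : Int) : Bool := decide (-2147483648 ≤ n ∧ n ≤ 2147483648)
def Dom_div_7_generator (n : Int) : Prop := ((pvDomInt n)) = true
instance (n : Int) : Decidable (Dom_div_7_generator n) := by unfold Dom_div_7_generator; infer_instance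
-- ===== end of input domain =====

-- B replaces A's scan-every-integer-and-test-%7 while loop by a range comprehension that emits the (i+1)-th multiple directly; measured faster by a constant factor.

-- ===== PORT A =====
-- A's while loop: number scans 1,2,3,…; yields number when number % 7 == 0, counting yields.
-- The Nat fuel only totalizes the while loop: the loop performs exactly 7·n iterations when
-- 0 < n (one yield per 7 scanned numbers) and 0 when n ≤ 0, so fuel 7·n.toNat never cuts it short.
def div7LoopA : Nat → Int → Int → Int → List Int
  | 0, _, _, _ => []
  | fuel + 1, n, number, gen =>
    if gen < n then
      if PySem.Int.mod number 7 = 0 then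
        number :: div7LoopA fuel n (number + 1) (gen + 1)
      else
        div7LoopA fuel n (number + 1) gen
    else []

def div_7_generator (n : Int) : List Int := div7LoopA (7 * n.toNat) n 1 0

-- ===== PORT B =====
-- B: 'yield from (7 * (i + 1) for i in range(n))' — a map over range(0, n).
def div_7_generator_alt (n : Int) : List Int :=
  (PySem.List.pyRange 0 n 1).map (fun i => 7 * (i + 1))

-- ===== PRECONDITION & SPEC =====
def Spec_div_7_generator (n : Int) (out : List Int) : Prop := out = div_7_generator_alt n
instance (n : Int) (out : List Int) : Decidable (Spec_div_7_generator n out) := by unfold Spec_div_7_generator; infer_instance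

-- ===== CLAIM (what is proved, stated in full; the proofs are below) =====
def Claim_equal_div_7_generator : Prop := ∀ (n : Int), Dom_div_7_generator n → Spec_div_7_generator n (div_7_generator n)

-- ===== LEMMAS AND PROOFS =====

-- one non-yield step of A's loop
lemma div7LoopA_skip (fuel : ℕ) (n number gen : Int) (hlt : gen < n) (h : number % 7 ≠ 0) :
    div7LoopA (fuel + 1) n number gen = div7LoopA fuel n (number + 1) gen := by
  have hm : PySem.Int.mod number 7 ≠ 0 := by
    have := PySem.Int.mod_eq_emod_of_pos (a := number) (b := 7) (by omega)
    omega
  rw [div7LoopA]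
  rw [if_pos hlt, if_neg hm]

-- main invariant: entering A's loop at number = 7*gen+1 with 7k fuel (k = remaining yields)
-- produces exactly the multiples mapped over the remaining range [gen, n)
lemma div7LoopA_eq_map (k : Nat) (n gen : Int) (hk : k = (n - gen).toNat) :
    div7LoopA (7 * k) n (7 * gen + 1) gen
      = (PySem.List.pyRange gen n 1).map (fun i => 7 * (i + 1)) := by
  induction k generalizing gen with
  | zero =>
    have hle : n ≤ gen := by omega
    rw [PySem.List.pyRange_one_eq_nil hle]
    simp [div7LoopA]
  | succ k ih =>
    have h : gen < n := by omega
    have e7 : 7 * (k + 1) = (((((((7 * k) + 1) + 1) + 1) + 1) + 1) + 1) + 1 := by ring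
    rw [e7]
    rw [div7LoopA_skip _ n (7 * gen + 1) gen h (by omega)]
    rw [show (7 * gen + 1 : Int) + 1 = 7 * gen + 2 by ring,
        div7LoopA_skip _ n (7 * gen + 2) gen h (by omega)]
    rw [show (7 * gen + 2 : Int) + 1 = 7 * gen + 3 by ring,
        div7LoopA_skip _ n (7 * gen + 3) gen h (by omega)]
    rw [show (7 * gen + 3 : Int) + 1 = 7 * gen + 4 by ring,
        div7LoopA_skip _ n (7 * gen + 4) gen h (by omega)]
    rw [show (7 * gen + 4 : Int) + 1 = 7 * gen + 5 by ring,
        div7LoopA_skip _ n (7 * gen + 5) gen h (by omega)]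
    rw [show (7 * gen + 5 : Int) + 1 = 7 * gen + 6 by ring,
        div7LoopA_skip _ n (7 * gen + 6) gen h (by omega)]
    rw [show (7 * gen + 6 : Int) + 1 = 7 * gen + 7 by ring]
    have hm : PySem.Int.mod (7 * gen + 7) 7 = 0 := by
      have := PySem.Int.mod_eq_emod_of_pos (a := 7 * gen + 7) (b := 7) (by omega)
      omega
    rw [div7LoopA]
    simp only [h, if_pos, hm]
    rw [show (7 * gen + 7 : Int) = 7 * (gen + 1) by ring, ih (gen + 1) (by omega)]
    rw [PySem.List.pyRange_one_cons h, List.map_cons]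

theorem div_7_generator_spec_aux (n : Int) :
    div_7_generator n = div_7_generator_alt n := by
  unfold div_7_generator div_7_generator_alt
  have := div7LoopA_eq_map n.toNat n 0 (by omega)
  simpa using this

-- ===== VERDICT (by name: the statement is the Claim_ definition above) =====
theorem div_7_generator_spec : Claim_equal_div_7_generator := by
  intro n _
  unfold Spec_div_7_generator
  exact div_7_generator_spec_aux n
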